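-- pv_equiv track=rewrite | github.com/jiwonLee-KU/Sentence-Reconstruction-Leveraging-Contextual-Meaning-from-Speech-Related-Brain-Signals | BTS_utils.py | find_matching_sentence
-- ===== SOURCE A (Python) =====
-- def find_matching_sentence(str_variable, sentences):
--     words = [sentence.lower().split() for sentence in sentences]
--
--     word_count = {}
--     for sentence in str_variable.lower().split('.'):
--         for word in sentence.split():
--             if word not in word_count:
--                 word_count[word] = 0
--             word_count[word] += 1
--
--     sentence_count = [0] * len(sentences)
--     for i in range(len(sentences)):
--         for word in words[i]:
--             if word in word_count:
--                 sentence_count[i] += word_count[word]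
--
--     max_count = max(sentence_count)
--     if max_count == 0:
--         return "No matching sentence found."
--     else:
--         max_index = sentence_count.index(max_count)
--         return sentences[max_index]
-- ===== SOURCE B (Python) =====
-- def find_matching_sentence(str_variable, sentences):
--     word_count = {}
--     for piece in str_variable.lower().split('.'):
--         for w in piece.split():
--             word_count[w] = word_count.get(w, 0) + 1
--     # inverted postings index: word -> sentence indices, one per occurrence
--     index = {}
--     for i, sentence in enumerate(sentences):
--         for w in sentence.lower().split():
--             index.setdefault(w, []).append(i)
--     sentence_count = [0] * len(sentences)
--     for w, c in word_count.items():
--         for i in index.get(w, []):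
--             sentence_count[i] += c
--     max_count = max(sentence_count)
--     if max_count == 0:
--         return "No matching sentence found."
--     return sentences[sentence_count.index(max_count)]
-- ===== Notes on version B (the rewrite author's own statement) =====
-- stated objective: alternative
-- what changed: B inverts the data flow: instead of A's per-sentence inner scan over its words looking each up in word_count, B builds an inverted postings index (word -> sentence indices, with multiplicity) and then iterates over word_count.items(), scattering each word's count into sentence_count via the postings lists; the max/index/lookup tail is unchanged.
import Mathlib
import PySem

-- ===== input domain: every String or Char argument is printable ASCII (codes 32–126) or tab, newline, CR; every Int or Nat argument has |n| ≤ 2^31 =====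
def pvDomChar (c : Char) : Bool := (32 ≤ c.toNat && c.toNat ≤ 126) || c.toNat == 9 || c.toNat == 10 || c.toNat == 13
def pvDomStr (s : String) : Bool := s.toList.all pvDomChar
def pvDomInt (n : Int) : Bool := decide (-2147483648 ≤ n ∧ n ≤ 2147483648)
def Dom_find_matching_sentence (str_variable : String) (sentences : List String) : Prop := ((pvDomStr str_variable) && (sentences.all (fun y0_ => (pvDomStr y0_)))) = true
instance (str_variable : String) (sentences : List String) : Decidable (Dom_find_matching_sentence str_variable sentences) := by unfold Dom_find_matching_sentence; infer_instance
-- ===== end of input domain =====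

-- B inverts the data flow: it builds an inverted postings index (word -> sentence indices, with
-- multiplicity) and scatters each word_count entry into sentence_count through it, instead of
-- A's per-sentence scan looking each word up (objective: alternative).

-- ===== PORT A =====
-- s.split('.') (separator nonempty, so split? is always some)
def fmsSplitDot (s : String) : List String := (PySem.Str.split? s ".").getD []

-- 'if word not in word_count: word_count[word] = 0; word_count[word] += 1'
def fmsAStep (d : PySem.Dict String Int) (word : String) : PySem.Dict String Int :=
  (if d.contains word then d else d.insert word 0).modify word 0 (· + 1)

def find_matching_sentence (str_variable : String) (sentences : List String) : String :=
  let words := sentences.map (fun sentence => PySem.Str.split₀ (PySem.Str.lower sentence))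
  let word_count := (fmsSplitDot (PySem.Str.lower str_variable)).foldl
      (fun d sentence => (PySem.Str.split₀ sentence).foldl fmsAStep d) PySem.Dict.empty
  let sentence_count := words.map (fun ws =>
      ws.foldl (fun c word => if word_count.contains word then c + word_count.getD word 0 else c) (0 : Int))
  match PySem.List.max? sentence_count (fun y => y) with
  | none => ""   -- Python raises ValueError here (sentences = []); excluded by Pre_
  | some max_count =>
    if max_count = 0 then "No matching sentence found."
    else
      match PySem.List.index? sentence_count max_count with
      | none => ""   -- unreachable: the max is an element of the list
      | some max_index => PySem.List.pyGetD sentences (max_index : Int) ""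

-- ===== PORT B =====
def find_matching_sentence_alt (str_variable : String) (sentences : List String) : String :=
  -- word_count[w] = word_count.get(w, 0) + 1
  let word_count := (fmsSplitDot (PySem.Str.lower str_variable)).foldl
      (fun d piece => (PySem.Str.split₀ piece).foldl
          (fun d w => d.insert w (d.getD w 0 + 1)) d) PySem.Dict.empty
  -- index.setdefault(w, []).append(i): insert keeps the key's position, the list grows at the end
  let index := (PySem.List.enumerate sentences 0).foldl
      (fun d p => (PySem.Str.split₀ (PySem.Str.lower p.2)).foldl
          (fun d w => d.insert w (d.getD w [] ++ [p.1])) d)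
      (PySem.Dict.empty : PySem.Dict String (List Int))
  -- for w, c in word_count.items(): for i in index.get(w, []): sentence_count[i] += c
  let sentence_count := word_count.items.foldl
      (fun sc p => (index.getD p.1 []).foldl
          (fun sc i => PySem.List.pySetD sc i (PySem.List.pyGetD sc i 0 + p.2)) sc)
      (List.replicate sentences.length (0 : Int))
  match PySem.List.max? sentence_count (fun y => y) with
  | none => ""   -- Python raises ValueError here (sentences = []); excluded by Pre_
  | some max_count =>
    if max_count = 0 then "No matching sentence found."
    else
      match PySem.List.index? sentence_count max_count with
      | none => ""   -- unreachable
      | some max_index => PySem.List.pyGetD sentences (max_index : Int) ""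

-- ===== PRECONDITION & SPEC =====
-- Pre_ excludes only sentences = [], where Python A raises ValueError (max of an empty list).
def Pre_find_matching_sentence (str_variable : String) (sentences : List String) : Prop :=
  sentences ≠ []
instance (str_variable : String) (sentences : List String) : Decidable (Pre_find_matching_sentence str_variable sentences) := by unfold Pre_find_matching_sentence; infer_instance

def pvWitness_find_matching_sentence : String × List String :=
  ("the cat. sat on", ["the dog", "a cat sat"])

def Spec_find_matching_sentence (str_variable : String) (sentences : List String) (out : String) : Prop := out = find_matching_sentence_alt str_variable sentences
instance (str_variable : String) (sentences : List String) (out : String) : Decidable (Spec_find_matching_sentence str_variable sentences out) := by unfold Spec_find_matching_sentence; infer_instance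

-- ===== CLAIM (what is proved, stated in full; the proofs are below) =====
def Claim_equal_find_matching_sentence : Prop := ∀ (str_variable : String) (sentences : List String), Dom_find_matching_sentence str_variable sentences → Pre_find_matching_sentence str_variable sentences → Spec_find_matching_sentence str_variable sentences (find_matching_sentence str_variable sentences)

-- ===== LEMMAS AND PROOFS =====

-- lowercased tokens of one sentence
def fmsTok (s : String) : List String := PySem.Str.split₀ (PySem.Str.lower s)

-- the flattened lowercased token list of the text
def fmsTokens (sv : String) : List String :=
  (fmsSplitDot (PySem.Str.lower sv)).flatMap PySem.Str.split₀

-- the common score of one sentence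
def fmsScore (sv s : String) : Int :=
  ((fmsTok s).map (fun w => ((fmsTokens sv).count w : Int))).sum

-- the shared tail of both ports (max / zero test / index / lookup), over the score list
def fmsTail (sc : List Int) (sentences : List String) : String :=
  match PySem.List.max? sc (fun y => y) with
  | none => ""
  | some max_count =>
    if max_count = 0 then "No matching sentence found."
    else
      match PySem.List.index? sc max_count with
      | none => ""
      | some max_index => PySem.List.pyGetD sentences (max_index : Int) ""

-- B's three intermediate structures, mirroring the lets of the port
def fmsWcB (sv : String) : PySem.Dict String Int :=
  (fmsSplitDot (PySem.Str.lower sv)).foldl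
      (fun d piece => (PySem.Str.split₀ piece).foldl
          (fun d w => d.insert w (d.getD w 0 + 1)) d) PySem.Dict.empty

def fmsIdxB (sentences : List String) : PySem.Dict String (List Int) :=
  (PySem.List.enumerate sentences 0).foldl
      (fun d p => (PySem.Str.split₀ (PySem.Str.lower p.2)).foldl
          (fun d w => d.insert w (d.getD w [] ++ [p.1])) d)
      PySem.Dict.empty

def fmsScB (sv : String) (sentences : List String) : List Int :=
  (fmsWcB sv).items.foldl
      (fun sc p => ((fmsIdxB sentences).getD p.1 []).foldl
          (fun sc i => PySem.List.pySetD sc i (PySem.List.pyGetD sc i 0 + p.2)) sc)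
      (List.replicate sentences.length (0 : Int))

-- ===== A-side characterisation =====

-- A's word_count fold: getD is the occurrence count
theorem fms_wc_getD (l : List String) (d : PySem.Dict String Int) (v : String) :
    ((l.foldl fmsAStep d).getD v 0) = d.getD v 0 + l.count v := by
  induction l generalizing d with
  | nil => simp
  | cons w t ih =>
    have hstep : (fmsAStep d w).getD v 0 = d.getD v 0 + (if v = w then 1 else 0) := by
      unfold fmsAStep
      by_cases hc : d.contains w = true
      · rw [if_pos hc, PySem.Dict.getD_modify]
        by_cases hv : v = w
        · subst hv; simp
        · simp [hv]
      · rw [if_neg hc, PySem.Dict.getD_modify]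
        have h0 : d.getD w 0 = 0 :=
          PySem.Dict.getD_of_not_contains d (k := w) 0 (by simpa using hc)
        by_cases hv : v = w
        · subst hv
          rw [if_pos rfl, if_pos rfl, PySem.Dict.getD_insert, if_pos rfl, h0]
        · rw [if_neg hv, if_neg hv, PySem.Dict.getD_insert, if_neg hv]
          simp
    rw [List.foldl_cons, ih, hstep, List.count_cons]
    by_cases hv : v = w
    · subst hv; simp; omega
    · simp [hv, Ne.symm hv]

theorem fms_wc_all_getD (ps : List String) (d : PySem.Dict String Int) (v : String) :
    ((ps.foldl (fun d p => (PySem.Str.split₀ p).foldl fmsAStep d) d).getD v 0)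
      = d.getD v 0 + (ps.flatMap PySem.Str.split₀).count v := by
  induction ps generalizing d with
  | nil => simp
  | cons p t ih => simp [List.foldl_cons, ih, fms_wc_getD, List.count_append]; omega

-- A's per-sentence count equals fmsScore
set_option maxHeartbeats 1000000 in
theorem fms_a_score (sv s : String) :
    (PySem.Str.split₀ (PySem.Str.lower s)).foldl
        (fun c word =>
          if ((fmsSplitDot (PySem.Str.lower sv)).foldl
                (fun d sentence => (PySem.Str.split₀ sentence).foldl fmsAStep d)
                PySem.Dict.empty).contains word
          then c + ((fmsSplitDot (PySem.Str.lower sv)).foldl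
                (fun d sentence => (PySem.Str.split₀ sentence).foldl fmsAStep d)
                PySem.Dict.empty).getD word 0
          else c) (0 : Int)
      = fmsScore sv s := by
  set wc := (fmsSplitDot (PySem.Str.lower sv)).foldl
      (fun d sentence => (PySem.Str.split₀ sentence).foldl fmsAStep d) PySem.Dict.empty with hwc
  have hgetD : ∀ w, wc.getD w 0 = ((fmsTokens sv).count w : Int) := by
    intro w
    rw [hwc, fms_wc_all_getD]
    simp [fmsTokens]
  have hcongr : ∀ (c : Int), ∀ w ∈ PySem.Str.split₀ (PySem.Str.lower s),
      (if wc.contains w then c + wc.getD w 0 else c) = c + ((fmsTokens sv).count w : Int) := by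
    intro c w _
    by_cases hc : wc.contains w = true
    · rw [if_pos hc, hgetD]
    · rw [if_neg hc, ← hgetD w,
        PySem.Dict.getD_of_not_contains wc (k := w) 0 (by simpa using hc)]
      ring
  rw [PySem.List.foldl_congr_mem _ _ _ _ hcongr, PySem.List.foldl_add]
  simp [fmsScore, fmsTok]

-- A's port is fmsTail of the score list
set_option maxHeartbeats 1000000 in
theorem fms_a_tail (sv : String) (ss : List String) :
    find_matching_sentence sv ss = fmsTail (ss.map (fmsScore sv)) ss := by
  have hmap : ((ss.map (fun sentence => PySem.Str.split₀ (PySem.Str.lower sentence))).map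
      (fun ws => ws.foldl
        (fun c word =>
          if ((fmsSplitDot (PySem.Str.lower sv)).foldl
                (fun d sentence => (PySem.Str.split₀ sentence).foldl fmsAStep d)
                PySem.Dict.empty).contains word
          then c + ((fmsSplitDot (PySem.Str.lower sv)).foldl
                (fun d sentence => (PySem.Str.split₀ sentence).foldl fmsAStep d)
                PySem.Dict.empty).getD word 0
          else c) (0 : Int)))
      = ss.map (fmsScore sv) := by
    rw [List.map_map]
    refine List.map_congr_left ?_
    intro s _
    exact fms_a_score sv s
  unfold find_matching_sentence fmsTail
  simp only [hmap]

-- ===== B-side characterisation =====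

-- B's port is fmsTail of its sentence_count list (definitional)
set_option maxHeartbeats 1000000 in
theorem fms_b_tail (sv : String) (ss : List String) :
    find_matching_sentence_alt sv ss = fmsTail (fmsScB sv ss) ss := by
  unfold find_matching_sentence_alt fmsTail fmsScB fmsWcB fmsIdxB
  rfl

-- B's word_count fold: getD is the occurrence count
theorem fms_wcB_getD1 (l : List String) (d : PySem.Dict String Int) (v : String) :
    ((l.foldl (fun d w => d.insert w (d.getD w 0 + 1)) d).getD v 0) = d.getD v 0 + l.count v := by
  induction l generalizing d with
  | nil => simp
  | cons w t ih =>
    rw [List.foldl_cons, ih, PySem.Dict.getD_insert, List.count_cons]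
    by_cases hv : v = w
    · subst hv; simp; omega
    · simp [hv, Ne.symm hv]

theorem fms_wcB_all (ps : List String) (d : PySem.Dict String Int) (v : String) :
    ((ps.foldl (fun d p => (PySem.Str.split₀ p).foldl
        (fun d w => d.insert w (d.getD w 0 + 1)) d) d).getD v 0)
      = d.getD v 0 + (ps.flatMap PySem.Str.split₀).count v := by
  induction ps generalizing d with
  | nil => simp
  | cons p t ih => simp [List.foldl_cons, ih, fms_wcB_getD1, List.count_append]; omega

theorem fms_wcB_getD (sv : String) (v : String) :
    (fmsWcB sv).getD v 0 = ((fmsTokens sv).count v : Int) := by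
  unfold fmsWcB fmsTokens
  rw [fms_wcB_all]
  simp

-- keys of B's word_count are nodup
theorem fms_wcB_nodup (sv : String) : (fmsWcB sv).keys.Nodup := by
  unfold fmsWcB
  generalize fmsSplitDot (PySem.Str.lower sv) = ps
  have : ∀ (d : PySem.Dict String Int), d.keys.Nodup →
      (ps.foldl (fun d piece => (PySem.Str.split₀ piece).foldl
          (fun d w => d.insert w (d.getD w 0 + 1)) d) d).keys.Nodup := by
    induction ps with
    | nil => intro d hd; exact hd
    | cons p t ih =>
      intro d hd
      rw [List.foldl_cons]
      exact ih _ (PySem.Dict.nodup_keys_foldl_insert _ (fun d w => d.getD w 0 + 1) d hd)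
  exact this PySem.Dict.empty PySem.Dict.nodup_keys_empty

-- postings list of a word: inner build fold
theorem fms_idx_inner (ws : List String) (d : PySem.Dict String (List Int)) (v : String) (c : Int) :
    ((ws.foldl (fun d w => d.insert w (d.getD w [] ++ [c])) d).getD v []) =
      d.getD v [] ++ List.replicate (ws.count v) c := by
  induction ws generalizing d with
  | nil => simp
  | cons w t ih =>
    rw [List.foldl_cons, ih, PySem.Dict.getD_insert, List.count_cons]
    by_cases hv : v = w
    · subst hv
      simp [List.replicate_succ, List.append_assoc]
    · simp [hv, Ne.symm hv]

-- postings list of a word: the whole index build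
theorem fms_idx_getD (ss : List String) (v : String) :
    (fmsIdxB ss).getD v []
      = (PySem.List.enumerate ss 0).flatMap
          (fun p => List.replicate ((fmsTok p.2).count v) p.1) := by
  unfold fmsIdxB
  generalize PySem.List.enumerate ss 0 = ps
  have : ∀ (d : PySem.Dict String (List Int)),
      ((ps.foldl (fun d p => (PySem.Str.split₀ (PySem.Str.lower p.2)).foldl
          (fun d w => d.insert w (d.getD w [] ++ [p.1])) d) d).getD v [])
        = d.getD v [] ++ ps.flatMap (fun p => List.replicate ((fmsTok p.2).count v) p.1) := by
    induction ps with
    | nil => simp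
    | cons p t ih =>
      intro d
      rw [List.foldl_cons, ih, fms_idx_inner, List.flatMap_cons, List.append_assoc]
      rfl
  rw [this PySem.Dict.empty]
  simp

-- counting one index in the postings flatMap over an enumerate
theorem fms_enum_count (g : String → Nat) (xs : List String) :
    ∀ (s : Int) (k : Nat) (hk : k < xs.length),
    ((PySem.List.enumerate xs s).flatMap (fun p => List.replicate (g p.2) p.1)).count (s + k)
      = g (xs[k]'hk) := by
  induction xs with
  | nil => intro s k hk; simp at hk
  | cons x t ih =>
    intro s k hk
    rw [PySem.List.enumerate_cons, List.flatMap_cons, List.count_append]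
    cases k with
    | zero =>
      have h1 : (List.replicate (g x) s).count (s + ((0:Nat):Int)) = g x := by simp
      have h2 : ((PySem.List.enumerate t (s+1)).flatMap (fun p => List.replicate (g p.2) p.1)).count (s + ((0:Nat):Int)) = 0 := by
        rw [List.count_eq_zero]
        intro hmem
        rw [List.mem_flatMap] at hmem
        obtain ⟨p, hp, hrep⟩ := hmem
        have he := List.eq_of_mem_replicate hrep
        rw [PySem.List.mem_enumerate_iff] at hp
        obtain ⟨m, hm, hpe⟩ := hp
        have : p.1 = s + 1 + m := by rw [hpe]
        omega
      rw [h1, h2]; simp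
    | succ k' =>
      have hne : ¬ ((s + ((k'+1:Nat):Int)) = s) := by push_cast; omega
      have h1 : (List.replicate (g x) s).count (s + ((k'+1:Nat):Int)) = 0 := by
        simp only [List.count_replicate]
        rw [if_neg (by simpa using fun h => hne (by omega))]
      have h2 : (s + ((k'+1:Nat):Int)) = (s+1) + ((k' : Nat):Int) := by push_cast; ring
      rw [h1, h2, ih (s+1) k' (by simpa using hk)]
      simp

-- every index in a postings list is in range
theorem fms_idx_range (ss : List String) (v : String) :
    ∀ i ∈ (fmsIdxB ss).getD v [], 0 ≤ i ∧ i < (ss.length : Int) := by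
  intro i hi
  rw [fms_idx_getD, List.mem_flatMap] at hi
  obtain ⟨p, hp, hrep⟩ := hi
  have he := List.eq_of_mem_replicate hrep
  rw [PySem.List.mem_enumerate_iff] at hp
  obtain ⟨m, hm, hpe⟩ := hp
  have : p.1 = 0 + m := by rw [hpe]
  omega

-- ===== the scatter loop =====

-- one in-place increment, on getD
theorem fms_upd_getD (sc : List Int) (i c : Int) (j : Nat) (h0 : 0 ≤ i) (hl : i < (sc.length : Int)) :
    (PySem.List.pySetD sc i (PySem.List.pyGetD sc i 0 + c)).getD j 0
      = if (j : Int) = i then sc.getD j 0 + c else sc.getD j 0 := by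
  rw [PySem.List.pySetD_of_nonneg _ _ h0, PySem.List.pyGetD_eq_getElem _ _ h0 hl]
  by_cases hj : (j : Int) = i
  · rw [if_pos hj]
    have hji : i.toNat = j := by omega
    have hjl : j < sc.length := by omega
    simp only [hji, List.getD_eq_getElem?_getD]
    rw [List.getElem?_set_self (by omega), List.getElem?_eq_getElem hjl]
    rfl
  · rw [if_neg hj]
    simp [List.getD_eq_getElem?_getD, List.getElem?_set_ne (by omega : i.toNat ≠ j)]

-- the inner scatter of one word's count
theorem fms_dist1 (c : Int) (is : List Int) : ∀ (sc : List Int) (j : Nat), j < sc.length →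
    (∀ i ∈ is, 0 ≤ i ∧ i < (sc.length : Int)) →
    ((is.foldl (fun sc i => PySem.List.pySetD sc i (PySem.List.pyGetD sc i 0 + c)) sc).getD j 0
      = sc.getD j 0 + c * is.count (j : Int)) := by
  induction is with
  | nil => intro sc j hj his; simp
  | cons i t ih =>
    intro sc j hj his
    obtain ⟨h0, hl⟩ := his i List.mem_cons_self
    have hlen : (PySem.List.pySetD sc i (PySem.List.pyGetD sc i 0 + c)).length = sc.length :=
      PySem.List.length_pySetD sc i _
    rw [List.foldl_cons, ih _ j (by omega) (by intro x hx; rw [hlen]; exact his x (List.mem_cons_of_mem _ hx)), fms_upd_getD sc i c j h0 hl, List.count_cons]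
    by_cases hj2 : (j : Int) = i
    · rw [if_pos hj2, if_pos (by simpa using hj2.symm)]; push_cast; ring
    · rw [if_neg hj2, if_neg (by simpa using fun h => hj2 (by omega))]; push_cast; ring

theorem fms_dist1_len (c : Int) (is : List Int) (sc : List Int) :
    (is.foldl (fun sc i => PySem.List.pySetD sc i (PySem.List.pyGetD sc i 0 + c)) sc).length
      = sc.length := by
  induction is generalizing sc with
  | nil => rfl
  | cons i t ih => rw [List.foldl_cons, ih, PySem.List.length_pySetD]

-- the outer scatter over word_count.items
theorem fms_dist2 (post : String → List Int) (ps : List (String × Int)) :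
    ∀ (sc : List Int) (j : Nat), j < sc.length →
    (∀ (v : String), ∀ i ∈ post v, 0 ≤ i ∧ i < (sc.length : Int)) →
    ((ps.foldl (fun sc p => (post p.1).foldl
        (fun sc i => PySem.List.pySetD sc i (PySem.List.pyGetD sc i 0 + p.2)) sc) sc).getD j 0
      = sc.getD j 0 + (ps.map (fun p => p.2 * ((post p.1).count (j : Int) : Int))).sum) := by
  induction ps with
  | nil => intro sc j hj hr; simp
  | cons p t ih =>
    intro sc j hj hr
    have hlen : ((post p.1).foldl
        (fun sc i => PySem.List.pySetD sc i (PySem.List.pyGetD sc i 0 + p.2)) sc).length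
        = sc.length := fms_dist1_len _ _ _
    rw [List.foldl_cons, ih _ j (by omega) (by intro v i hi; rw [hlen]; exact hr v i hi),
      fms_dist1 p.2 (post p.1) sc j hj (hr p.1), List.map_cons, List.sum_cons]
    ring

-- ===== grouping sum =====

theorem fms_sum_ite (K : List String) (hK : K.Nodup) (f : String → Int) (x : String) :
    (K.map (fun k => if k = x then f k else 0)).sum = if x ∈ K then f x else 0 := by
  induction K with
  | nil => simp
  | cons k t ih =>
    rw [List.map_cons, List.sum_cons, ih (List.nodup_cons.mp hK).2]
    by_cases hk : k = x
    · subst hk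
      rw [if_pos rfl, if_neg ((List.nodup_cons.mp hK).1), if_pos List.mem_cons_self]
      ring
    · rw [if_neg hk]
      by_cases hx : x ∈ t
      · rw [if_pos hx, if_pos (List.mem_cons_of_mem _ hx)]; ring
      · rw [if_neg hx, if_neg (by simp [hx]; exact fun h => hk h.symm)]; ring

theorem fms_group (K : List String) (hK : K.Nodup) (f : String → Int)
    (hf : ∀ w, w ∉ K → f w = 0) (l : List String) :
    (K.map (fun k => f k * (l.count k : Int))).sum = (l.map f).sum := by
  induction l with
  | nil => simp
  | cons x t ih =>
    have hsplit : (K.map (fun k => f k * ((x :: t).count k : Int))).sum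
        = (K.map (fun k => f k * (t.count k : Int))).sum
          + (K.map (fun k => if k = x then f k else 0)).sum := by
      rw [← PySem.List.sum_map_add_int]
      congr 1
      refine List.map_congr_left ?_
      intro k _
      have hxk : ((x :: t).count k : Int) = (t.count k : Int) + (if k = x then 1 else 0) := by
        rw [List.count_cons]
        by_cases hk : k = x
        · simp [hk]
        · simp [hk]; exact fun h => hk h.symm
      rw [hxk]
      by_cases hk : k = x
      · rw [if_pos hk, if_pos hk]; ring
      · rw [if_neg hk, if_neg hk]; ring
    rw [hsplit, ih, fms_sum_ite K hK f x, List.map_cons, List.sum_cons]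
    by_cases hx : x ∈ K
    · rw [if_pos hx]; ring
    · rw [if_neg hx, hf x hx]; ring

-- ===== B's sentence_count equals the score list =====

theorem fms_dist2_len (post : String → List Int) (ps : List (String × Int)) (sc : List Int) :
    (ps.foldl (fun sc p => (post p.1).foldl
        (fun sc i => PySem.List.pySetD sc i (PySem.List.pyGetD sc i 0 + p.2)) sc) sc).length
      = sc.length := by
  induction ps generalizing sc with
  | nil => rfl
  | cons p t ih => rw [List.foldl_cons, ih, fms_dist1_len]

theorem fms_scB_getD (sv : String) (ss : List String) (j : Nat) (hj : j < ss.length) :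
    (fmsScB sv ss).getD j 0 = fmsScore sv (ss[j]'hj) := by
  unfold fmsScB
  rw [fms_dist2 (fun v => (fmsIdxB ss).getD v []) _ _ j (by simpa using hj)
      (by intro v i hi
          have := fms_idx_range ss v i hi
          simpa using this)]
  have hcount : ∀ (p : String × Int),
      p.2 * ((((fmsIdxB ss).getD p.1 []).count ((j : Nat) : Int) : Int))
        = p.2 * (((fmsTok (ss[j]'hj)).count p.1 : Int)) := by
    intro p
    have h0 : ((0 : Int) + (j : Nat)) = ((j : Nat) : Int) := by ring
    rw [fms_idx_getD, ← h0,
      fms_enum_count (fun s => (fmsTok s).count p.1) ss 0 j hj]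
  rw [List.map_congr_left (fun p _ => hcount p),
    PySem.Dict.items_eq_map_keys (fmsWcB sv) (fms_wcB_nodup sv) 0, List.map_map]
  have hgroup := fms_group (fmsWcB sv).keys (fms_wcB_nodup sv)
      (fun w => (fmsWcB sv).getD w 0)
      (by intro w hw
          refine PySem.Dict.getD_of_not_contains _ _ ?_
          rw [PySem.Dict.contains_eq_decide_mem_keys]
          simpa using hw)
      (fmsTok (ss[j]'hj))
  simp only [Function.comp_def]
  rw [hgroup]
  have : ((fmsTok (ss[j]'hj)).map (fun w => (fmsWcB sv).getD w 0))
      = (fmsTok (ss[j]'hj)).map (fun w => (((fmsTokens sv).count w : Int))) := by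
    refine List.map_congr_left ?_
    intro w _
    exact fms_wcB_getD sv w
  rw [this]
  simp [fmsScore]

theorem fms_scB_eq (sv : String) (ss : List String) :
    fmsScB sv ss = ss.map (fmsScore sv) := by
  have hlen : (fmsScB sv ss).length = ss.length := by
    unfold fmsScB
    rw [fms_dist2_len (fun v => (fmsIdxB ss).getD v []) (fmsWcB sv).items]
    simp
  apply List.ext_getElem (by rw [hlen]; simp)
  intro j h1 h2
  have hj : j < ss.length := by omega
  have hL := fms_scB_getD sv ss j hj
  rw [List.getD_eq_getElem _ _ h1] at hL
  rw [hL]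
  simp

-- ===== VERDICT (by name: the statement is the Claim_ definition above) =====
theorem find_matching_sentence_spec : Claim_equal_find_matching_sentence := by
  intro sv ss _ _
  unfold Spec_find_matching_sentence
  rw [fms_a_tail, fms_b_tail, fms_scB_eq]
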